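-- pv_equiv track=rewrite | github.com/marin-community/marin | experiments/domain_phase_mix/exploratory/two_phase_many/build_power_family_penalty_vs_baselines_presentation_table.py | _titleize_slug
-- ===== SOURCE A (Python) =====
-- TOKEN_DISPLAY_NAMES = {
--     "ao3": "AO3",
--     "bbc": "BBC",
--     "c4": "C4",
--     "cpp": "C++",
--     "gab": "Gab",
--     "helm": "HELM",
--     "mc4": "mC4",
--     "m2d2": "M2D2",
--     "ptb": "PTB",
--     "s2orc": "S2ORC",
-- }
--
-- def _display_token(token: str) -> str:
--     return TOKEN_DISPLAY_NAMES.get(token.lower(), token.title())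
--
-- def _titleize_slug(slug: str) -> str:
--     pieces: list[str] = []
--     for chunk in slug.split("_"):
--         if "-" in chunk:
--             subpieces = [_display_token(part) for part in chunk.split("-")]
--             pieces.append("-".join(subpieces))
--         else:
--             pieces.append(_display_token(chunk))
--     return " ".join(pieces)
-- ===== SOURCE B (Python) =====
-- SPECIAL_TOKENS = [
--     ("ao3", "AO3"),
--     ("bbc", "BBC"),
--     ("c4", "C4"),
--     ("cpp", "C++"),
--     ("gab", "Gab"),
--     ("helm", "HELM"),
--     ("mc4", "mC4"),
--     ("m2d2", "M2D2"),
--     ("ptb", "PTB"),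
--     ("s2orc", "S2ORC"),
-- ]
--
--
-- def _display(token: str) -> str:
--     low = token.lower()
--     for key, name in SPECIAL_TOKENS:
--         if key == low:
--             return name
--     # title-case: a letter is uppercased after a non-letter, lowercased after a letter
--     prev = False
--     out = []
--     for ch in token:
--         out.append(ch.lower() if prev else ch.upper())
--         prev = ch.isalpha()
--     return "".join(out)
--
--
-- def _titleize_slug(slug: str) -> str:
--     # recursive: display the leading token, map the separator, recurse on the rest
--     k = 0
--     while k < len(slug) and slug[k] != "_" and slug[k] != "-":
--         k += 1
--     head = _display(slug[:k])
--     if k == len(slug):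
--         return head
--     return head + (" " if slug[k] == "_" else "-") + _titleize_slug(slug[k + 1:])
-- ===== Notes on version B (the rewrite author's own statement) =====
-- stated objective: alternative
-- what changed: Replaces A's nested split-by-underscore-then-split-by-hyphen staged passes with a recursive decomposition that peels the leading separator-free token off the string, maps the separator, and recurses on the remainder; the dict lookup becomes an ordered association-list scan and str.title() becomes an explicit prev-was-letter fold.
import Mathlib
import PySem

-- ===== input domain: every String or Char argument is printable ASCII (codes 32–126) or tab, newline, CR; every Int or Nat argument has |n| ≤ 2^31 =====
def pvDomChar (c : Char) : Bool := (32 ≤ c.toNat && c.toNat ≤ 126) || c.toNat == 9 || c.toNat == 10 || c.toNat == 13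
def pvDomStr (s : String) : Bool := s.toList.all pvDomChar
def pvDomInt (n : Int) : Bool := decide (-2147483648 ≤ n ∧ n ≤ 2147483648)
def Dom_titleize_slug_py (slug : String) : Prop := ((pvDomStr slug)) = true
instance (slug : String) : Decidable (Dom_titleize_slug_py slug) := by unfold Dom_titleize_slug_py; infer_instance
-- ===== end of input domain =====

-- B replaces A's nested split-by-'_'-then-split-by-'-' passes with a recursive decomposition:
-- peel off the leading token, map the separator, recurse on the remainder (objective: alternative, same cost).

-- ===== PORT A =====
-- module constant TOKEN_DISPLAY_NAMES (A's dict)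
def pvTokenTable : PySem.Dict (List Char) (List Char) :=
  PySem.Dict.ofList
    [("ao3".toList, "AO3".toList), ("bbc".toList, "BBC".toList), ("c4".toList, "C4".toList),
     ("cpp".toList, "C++".toList), ("gab".toList, "Gab".toList), ("helm".toList, "HELM".toList),
     ("mc4".toList, "mC4".toList), ("m2d2".toList, "M2D2".toList), ("ptb".toList, "PTB".toList),
     ("s2orc".toList, "S2ORC".toList)]

-- str.title(), exact on the ASCII domain (there 'cased' = alpha): a char is uppercased when the
-- previous char is not alphabetic, lowercased otherwise; non-letters pass through unchanged.
def pyTitleGo : List Char → Bool → List Char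
  | [], _ => []
  | c :: rest, prev =>
    (if prev then PySem.Chars.lowerChar c else PySem.Chars.upperChar c) :: pyTitleGo rest (PySem.Chars.isalpha c)

-- A's helper _display_token: dict lookup with title-case default
def displayToken (tok : List Char) : List Char :=
  pvTokenTable.getD (PySem.Chars.lower tok) (pyTitleGo tok false)

def titleize_slug_py (slug : String) : String :=
  let pieces : List (List Char) :=
    (PySem.Chars.splitOn slug.toList ['_']).foldl
      (fun pieces chunk =>
        pieces ++ [if PySem.Chars.isIn ['-'] chunk then
                     PySem.Chars.join ['-'] ((PySem.Chars.splitOn chunk ['-']).map displayToken)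
                   else displayToken chunk]) []
  String.mk (PySem.Chars.join [' '] pieces)

-- ===== PORT B =====
-- Source B's SPECIAL_TOKENS: a plain association list scanned in order
def pvSpecialTokens : List (List Char × List Char) :=
  [("ao3".toList, "AO3".toList), ("bbc".toList, "BBC".toList), ("c4".toList, "C4".toList),
   ("cpp".toList, "C++".toList), ("gab".toList, "Gab".toList), ("helm".toList, "HELM".toList),
   ("mc4".toList, "mC4".toList), ("m2d2".toList, "M2D2".toList), ("ptb".toList, "PTB".toList),
   ("s2orc".toList, "S2ORC".toList)]

-- Source B's 'for key, name in SPECIAL_TOKENS: if key == low: return name'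
def bLookup : List (List Char × List Char) → List Char → Option (List Char)
  | [], _ => none
  | (key, name) :: rest, low => if key == low then some name else bLookup rest low

-- Source B's title-casing loop: foldl carrying (prev-was-letter, output so far)
def bTitle (tok : List Char) : List Char :=
  (tok.foldl
    (fun (st : Bool × List Char) c =>
      (PySem.Chars.isalpha c,
       st.2 ++ [if st.1 then PySem.Chars.lowerChar c else PySem.Chars.upperChar c]))
    (false, [])).2

-- Source B's _display
def bDisplay (tok : List Char) : List Char :=
  match bLookup pvSpecialTokens (PySem.Chars.lower tok) with
  | some name => name
  | none => bTitle tok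

def bSep (c : Char) : Bool := c == '_' || c == '-'

-- Source B's recursion: leading token (the while-loop scan to index k), separator, recurse on the rest
def altRec (cs : List Char) : List Char :=
  let tok := cs.takeWhile (fun c => !(bSep c))
  match h : cs.dropWhile (fun c => !(bSep c)) with
  | [] => bDisplay tok
  | sep :: rest =>
    bDisplay tok ++ (if sep = '_' then ' ' else '-') :: altRec rest
termination_by cs.length
decreasing_by
  have hle := List.length_dropWhile_le (fun c => !(bSep c)) cs
  rw [h] at hle
  simp at hle
  omega

def titleize_slug_py_alt (slug : String) : String :=
  String.mk (altRec slug.toList)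

-- ===== PRECONDITION & SPEC =====
def Spec_titleize_slug_py (slug : String) (out : String) : Prop := out = titleize_slug_py_alt slug
instance (slug : String) (out : String) : Decidable (Spec_titleize_slug_py slug out) := by unfold Spec_titleize_slug_py; infer_instance

-- ===== CLAIM (what is proved, stated in full; the proofs are below) =====
def Claim_equal_titleize_slug_py : Prop := ∀ (slug : String), Dom_titleize_slug_py slug → Spec_titleize_slug_py slug (titleize_slug_py slug)

-- ===== LEMMAS AND PROOFS =====

-- simple structural split on a single separator character
def splitC (s : Char) : List Char → List (List Char)
  | [] => [[]]
  | c :: rest => if c = s then [] :: splitC s rest else (splitC s rest).modifyHead (c :: ·)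

theorem splitC_ne_nil (s : Char) (l : List Char) : splitC s l ≠ [] := by
  induction l with
  | nil => simp [splitC]
  | cons c rest ih =>
    simp only [splitC]
    split_ifs
    · simp
    · cases h : splitC s rest with
      | nil => exact absurd h ih
      | cons a t => simp [List.modifyHead]

theorem splitC_exists_cons (s : Char) (l : List Char) :
    ∃ a t, splitC s l = a :: t :=
  List.ne_nil_iff_exists_cons.mp (splitC_ne_nil s l)

theorem go_eq (s : Char) : ∀ (fuel : Nat) (l cur acc : List Char) (acc' : List (List Char)),
    l.length < fuel →
    PySem.Chars.splitOn.go [s] fuel l cur acc' =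
      acc'.reverse ++ (splitC s l).modifyHead (cur.reverse ++ ·) := by
  intro fuel
  induction fuel with
  | zero => intro l cur acc acc' h; omega
  | succ fuel ih =>
    intro l cur acc acc' h
    cases l with
    | nil =>
      simp [PySem.Chars.splitOn.go, splitC, List.modifyHead]
    | cons c rest =>
      by_cases hc : c = s
      · subst hc
        have hpre : List.isPrefixOf [c] (c :: rest) = true := by simp [List.isPrefixOf]
        rw [PySem.Chars.splitOn.go]
        simp only [hpre, if_true, List.length_cons, List.length_nil, List.drop_succ_cons,
          List.drop_zero]
        rw [ih rest [] acc (cur.reverse :: acc') (by simpa using Nat.lt_of_succ_lt_succ h)]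
        obtain ⟨a, t, hsp⟩ := splitC_exists_cons c rest
        simp [splitC, hsp, List.modifyHead]
      · have hsc : ¬ s = c := fun h => hc h.symm
        have hpre : List.isPrefixOf [s] (c :: rest) = false := by
          simp [List.isPrefixOf, hsc]
        rw [PySem.Chars.splitOn.go]
        simp only [hpre, if_false, Bool.false_eq_true]
        rw [ih rest (c :: cur) acc acc' (by simpa using Nat.lt_of_succ_lt_succ h)]
        obtain ⟨a, t, hsp⟩ := splitC_exists_cons s rest
        simp [splitC, hsp, hc, List.modifyHead]

theorem splitOn_eq_splitC (s : Char) (l : List Char) :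
    PySem.Chars.splitOn l [s] = splitC s l := by
  unfold PySem.Chars.splitOn
  rw [go_eq s (l.length + 1) l [] [] [] (by omega)]
  obtain ⟨a, t, hsp⟩ := splitC_exists_cons s l
  simp [hsp, List.modifyHead]

theorem splitC_prefix (s : Char) (pre l : List Char) (h : s ∉ pre) :
    splitC s (pre ++ l) = (splitC s l).modifyHead (pre ++ ·) := by
  induction pre with
  | nil =>
    obtain ⟨a, t, hsp⟩ := splitC_exists_cons s l
    simp [hsp, List.modifyHead]
  | cons c pre' ih =>
    have hc : ¬ c = s := by intro hh; exact h (by simp [hh])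
    have h' : s ∉ pre' := fun hm => h (by simp [hm])
    obtain ⟨a, t, hsp⟩ := splitC_exists_cons s l
    simp only [List.cons_append, splitC, hc, if_false, ih h', hsp, List.modifyHead]

theorem splitC_no_sep (s : Char) (l : List Char) (h : s ∉ l) : splitC s l = [l] := by
  have := splitC_prefix s l [] h
  simpa [splitC, List.modifyHead] using this

theorem join_cons_append (sep a b : List Char) (t : List (List Char)) :
    PySem.Chars.join sep ((a ++ b) :: t) = a ++ PySem.Chars.join sep (b :: t) := by
  cases t with
  | nil => simp [PySem.Chars.join_singleton]
  | cons y t' => rw [PySem.Chars.join_cons_cons, PySem.Chars.join_cons_cons]; simp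

-- the per-chunk value A computes, with the '-' branch folded away
def hfun (chunk : List Char) : List Char :=
  PySem.Chars.join ['-'] ((splitC '-' chunk).map displayToken)

theorem gfun_eq (chunk : List Char) :
    (if PySem.Chars.isIn ['-'] chunk then
       PySem.Chars.join ['-'] ((PySem.Chars.splitOn chunk ['-']).map displayToken)
     else displayToken chunk) = hfun chunk := by
  rw [splitOn_eq_splitC]
  by_cases hm : '-' ∈ chunk
  · have : PySem.Chars.isIn ['-'] chunk = true := by
      rw [PySem.Chars.isIn_iff_infix]
      exact (List.singleton_infix_iff _ _).mpr hm
    simp [this, hfun]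
  · have : PySem.Chars.isIn ['-'] chunk = false := by
      rw [PySem.Chars.isIn_eq_false_iff]
      intro hin
      exact hm ((List.singleton_infix_iff _ _).mp hin)
    simp [this, hfun, splitC_no_sep '-' chunk hm, PySem.Chars.join_singleton]

-- A's result as a function of the character list
def Acore (cs : List Char) : List Char :=
  PySem.Chars.join [' '] ((splitC '_' cs).map hfun)

-- proof-side middle form: the accumulator-style single pass both sides reduce to
def fmid : List Char → List Char → List Char
  | [], tok => displayToken tok
  | c :: rest, tok =>
    if c = '_' then displayToken tok ++ ' ' :: fmid rest []
    else if c = '-' then displayToken tok ++ '-' :: fmid rest []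
    else fmid rest (tok ++ [c])

theorem fmid_eq_Acore : ∀ (cs tok : List Char), '_' ∉ tok → '-' ∉ tok →
    fmid cs tok = Acore (tok ++ cs) := by
  intro cs
  induction cs with
  | nil =>
    intro tok h1 h2
    simp only [fmid, Acore, List.append_nil, splitC_no_sep '_' tok h1, List.map_cons,
      List.map_nil, PySem.Chars.join_singleton, hfun, splitC_no_sep '-' tok h2]
  | cons c rest ih =>
    intro tok h1 h2
    by_cases hc1 : c = '_'
    · subst hc1
      have hsp : splitC '_' (tok ++ '_' :: rest) = tok :: splitC '_' rest := by
        rw [splitC_prefix '_' tok ('_' :: rest) h1]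
        obtain ⟨a, t, hsp⟩ := splitC_exists_cons '_' rest
        simp [splitC, hsp, List.modifyHead]
      obtain ⟨a, t, hsp'⟩ := splitC_exists_cons '_' rest
      simp only [fmid, if_pos rfl, Acore, hsp, List.map_cons, hsp', ih [] (by simp) (by simp),
        PySem.Chars.join_cons_cons, List.append_nil]
      have : hfun tok = displayToken tok := by
        simp [hfun, splitC_no_sep '-' tok h2, PySem.Chars.join_singleton]
      rw [this]; simp [Acore, hsp']
    · by_cases hc2 : c = '-'
      · subst hc2
        obtain ⟨c0, L', hsp0⟩ := splitC_exists_cons '_' rest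
        have hsp : splitC '_' (tok ++ '-' :: rest) = (tok ++ '-' :: c0) :: L' := by
          have hpre : '_' ∉ tok ++ ['-'] := by
            simp [h1]
          have := splitC_prefix '_' (tok ++ ['-']) rest hpre
          simp only [List.append_assoc, List.singleton_append] at this
          rw [this, hsp0]
          simp [List.modifyHead]
        have hh : hfun (tok ++ '-' :: c0) = displayToken tok ++ '-' :: hfun c0 := by
          obtain ⟨a, t, hspc⟩ := splitC_exists_cons '-' c0
          have : splitC '-' (tok ++ '-' :: c0) = tok :: splitC '-' c0 := by
            rw [splitC_prefix '-' tok ('-' :: c0) h2]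
            simp [splitC, hspc, List.modifyHead]
          simp only [hfun, this, List.map_cons, hspc, PySem.Chars.join_cons_cons]
          simp [hfun, hspc]
        have hfa : fmid rest [] = Acore rest := ih [] (by simp) (by simp)
        have hAc : Acore rest = PySem.Chars.join [' '] (hfun c0 :: L'.map hfun) := by
          simp [Acore, hsp0]
        have hne : ¬ ('-' : Char) = '_' := by decide
        simp only [fmid, if_neg hne, if_true, hfa, hAc, Acore, hsp, List.map_cons, hh]
        simp only [hsp0, List.map_cons]
        cases L' with
        | nil => simp [PySem.Chars.join_singleton]
        | cons y t =>
          rw [show (displayToken tok ++ '-' :: hfun c0) = (displayToken tok ++ ['-']) ++ hfun c0 from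
                by simp,
              join_cons_append]
          simp
      · have hpre : '_' ∉ tok ++ [c] := by
          simp [h1]
          exact fun h => hc1 h.symm
        have hpre2 : '-' ∉ tok ++ [c] := by
          simp [h2]
          exact fun h => hc2 h.symm
        simp only [fmid, if_neg hc1, if_neg hc2, ih (tok ++ [c]) hpre hpre2]
        simp

theorem titleize_eq_Acore (slug : String) : titleize_slug_py slug = String.mk (Acore slug.toList) := by
  unfold titleize_slug_py
  rw [PySem.List.foldl_append_singleton_eq_map]
  congr 1
  rw [List.map_congr_left (fun chunk _ => gfun_eq chunk), splitOn_eq_splitC]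
  simp [Acore]

-- B's helpers compute A's _display_token
theorem bTitle_go (tok : List Char) : ∀ (prev : Bool) (acc : List Char),
    (tok.foldl
      (fun (st : Bool × List Char) c =>
        (PySem.Chars.isalpha c,
         st.2 ++ [if st.1 then PySem.Chars.lowerChar c else PySem.Chars.upperChar c]))
      (prev, acc)).2 = acc ++ pyTitleGo tok prev := by
  induction tok with
  | nil => intro prev acc; simp [pyTitleGo]
  | cons c rest ih => intro prev acc; simp [pyTitleGo, ih]

theorem bTitle_eq (tok : List Char) : bTitle tok = pyTitleGo tok false := by
  unfold bTitle
  rw [bTitle_go]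
  simp

theorem getD_mk_eq_bLookup (l : List (List Char × List Char)) (low d : List Char) :
    (PySem.Dict.mk l).getD low d = ((bLookup l low).getD d) := by
  induction l with
  | nil =>
    simp [bLookup, PySem.Dict.getD_eq_get?_getD, PySem.Dict.get?]
  | cons p rest ih =>
    obtain ⟨key, name⟩ := p
    rw [PySem.Dict.getD_eq_get?_getD, PySem.Dict.get?_mk_cons]
    by_cases h : key == low
    · simp [bLookup, h]
    · simp only [bLookup, h, if_false, Bool.false_eq_true]
      rw [← PySem.Dict.getD_eq_get?_getD, ih]

theorem pvTokenTable_eq_mk : pvTokenTable = PySem.Dict.mk pvSpecialTokens := by decide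

theorem bDisplay_eq (tok : List Char) : bDisplay tok = displayToken tok := by
  unfold bDisplay displayToken
  rw [pvTokenTable_eq_mk, getD_mk_eq_bLookup]
  cases h : bLookup pvSpecialTokens (PySem.Chars.lower tok) <;> simp [h, bTitle_eq]

-- pushing a separator-free prefix into fmid's accumulator
theorem fmid_push : ∀ (t cs tok : List Char), (∀ c ∈ t, bSep c = false) →
    fmid (t ++ cs) tok = fmid cs (tok ++ t) := by
  intro t
  induction t with
  | nil => intro cs tok _; simp
  | cons c t' ih =>
    intro cs tok h
    have hc : bSep c = false := h c (by simp)
    have h1 : ¬ c = '_' := by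
      intro hh; subst hh; simp [bSep] at hc
    have h2 : ¬ c = '-' := by
      intro hh; subst hh; simp [bSep] at hc
    simp only [List.cons_append, fmid, if_neg h1, if_neg h2]
    rw [ih cs (tok ++ [c]) (fun x hx => h x (by simp [hx]))]
    simp

theorem dropWhile_head_false {p : Char → Bool} :
    ∀ (cs : List Char) (sep : Char) (rest : List Char),
    cs.dropWhile p = sep :: rest → p sep = false := by
  intro cs
  induction cs with
  | nil => intro sep rest h; simp at h
  | cons c t ih =>
    intro sep rest h
    rw [List.dropWhile_cons] at h
    by_cases hp : p c
    · simp only [hp, if_true] at h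
      exact ih sep rest h
    · simp only [hp, if_false, Bool.false_eq_true] at h
      cases h
      simpa using hp

theorem altRec_eq_fmid : ∀ (n : Nat) (cs : List Char), cs.length ≤ n →
    altRec cs = fmid cs [] := by
  intro n
  induction n with
  | zero =>
    intro cs h
    have : cs = [] := by
      cases cs with
      | nil => rfl
      | cons a t => simp at h
    subst this
    simp [altRec, fmid, bDisplay_eq]
  | succ n ih =>
    intro cs h
    have hsplit := List.takeWhile_append_dropWhile (p := fun c => !(bSep c)) (l := cs)
    have htok : ∀ c ∈ cs.takeWhile (fun c => !(bSep c)), bSep c = false := by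
      intro c hc
      have := List.mem_takeWhile_imp hc
      simpa using this
    rw [altRec]
    split
    · rename_i heq
      conv_rhs => rw [← hsplit, heq]
      rw [fmid_push _ [] _ htok]
      simp [fmid, bDisplay_eq]
    · rename_i sep rest heq
      have hsep : bSep sep = true := by
        have := dropWhile_head_false (p := fun c => !(bSep c)) cs sep rest heq
        simpa using this
      have hlen : rest.length ≤ n := by
        have hle := List.length_dropWhile_le (fun c => !(bSep c)) cs
        rw [heq] at hle
        simp at hle
        omega
      conv_rhs => rw [← hsplit, heq]
      rw [fmid_push _ (sep :: rest) _ htok]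
      have hcase : sep = '_' ∨ sep = '-' := by
        simp [bSep] at hsep
        tauto
      rcases hcase with h1 | h1 <;> subst h1
      · rw [bDisplay_eq, ih rest hlen]
        simp [fmid]
      · rw [bDisplay_eq, ih rest hlen]
        have hne : ¬ ('-' : Char) = '_' := by decide
        simp [fmid, hne]

theorem alt_eq_Acore (slug : String) : titleize_slug_py_alt slug = String.mk (Acore slug.toList) := by
  unfold titleize_slug_py_alt
  rw [altRec_eq_fmid slug.toList.length slug.toList le_rfl,
    fmid_eq_Acore slug.toList [] (by simp) (by simp)]
  simp

-- ===== VERDICT (by name: the statement is the Claim_ definition above) =====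
theorem titleize_slug_py_spec : Claim_equal_titleize_slug_py := by
  intro slug _
  unfold Spec_titleize_slug_py
  rw [titleize_eq_Acore, alt_eq_Acore]
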